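-- pv_equiv track=rewrite | github.com/czuesr/APWeb-WAIM-FOICP-Miner | FOICP-Miner/Generate_frequent_patterns/utils.py | select_prevalent_co_locations
-- ===== SOURCE A (Python) =====
-- min_prev = 0.1
--
-- def select_prevalent_co_locations(Ck,CNT):
--     P = []
--     for mode, instances in Ck:
--         flag = True
--         for i in range(len(mode)):
--             PR_S = []#存放每个实例的贡献值 应该要比较实例相同的行实例之间的贡献度 一个类型的实例专属 换下一个特征的时候
--             #要清零
--             for instance in instances:#拿出[A1,B1,C1,D1]  [A1,B2,C1,D1] [A1,B3,C1,D1]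
--                 p1 = i #p1是基准 是我们要求的那特征的实例
--                 PR_S.append(instance[p1])
--             PR_S = list(set(PR_S))
--             PR_num = len(PR_S) / CNT[mode[i]]
--             if PR_num < min_prev:
--                 flag = False
--         if flag:
--             P.append(mode)
--     return P
-- ===== SOURCE B (Python) =====
-- min_prev = 0.1
--
-- def _distinct_sorted(values):
--     # distinct count by sort-then-scan: after sorting, equal values are
--     # adjacent, so counting boundaries counts the distinct values (no hash set)
--     n = 0
--     prev = None
--     for v in sorted(values):
--         if prev is None or v != prev:
--             n += 1
--         prev = v
--     return n
--
-- def select_prevalent_co_locations(Ck, CNT):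
--     return [mode for mode, instances in Ck
--             if all(_distinct_sorted([inst[i] for inst in instances]) / CNT[mode[i]] >= min_prev
--                    for i in range(len(mode)))]
-- ===== Notes on version B (the rewrite author's own statement) =====
-- stated objective: alternative
-- what changed: B counts a position's distinct values by sorting the column and counting boundaries between adjacent unequal values (no set/hash), and replaces A's nested flag-accumulating loops by a filter comprehension with an all() over positions.
-- outside the precondition, e.g. on select_prevalent_co_locations([(['A'], [[]])], {'A': 1}): A raises IndexError, B raises IndexError; on select_prevalent_co_locations([(['A'], [['a1']])], {}): A raises KeyError, B raises KeyError; on select_prevalent_co_locations([(['A'], [['a1']])], {'A': 0}): A raises ZeroDivisionError, B raises ZeroDivisionError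
import Mathlib
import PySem

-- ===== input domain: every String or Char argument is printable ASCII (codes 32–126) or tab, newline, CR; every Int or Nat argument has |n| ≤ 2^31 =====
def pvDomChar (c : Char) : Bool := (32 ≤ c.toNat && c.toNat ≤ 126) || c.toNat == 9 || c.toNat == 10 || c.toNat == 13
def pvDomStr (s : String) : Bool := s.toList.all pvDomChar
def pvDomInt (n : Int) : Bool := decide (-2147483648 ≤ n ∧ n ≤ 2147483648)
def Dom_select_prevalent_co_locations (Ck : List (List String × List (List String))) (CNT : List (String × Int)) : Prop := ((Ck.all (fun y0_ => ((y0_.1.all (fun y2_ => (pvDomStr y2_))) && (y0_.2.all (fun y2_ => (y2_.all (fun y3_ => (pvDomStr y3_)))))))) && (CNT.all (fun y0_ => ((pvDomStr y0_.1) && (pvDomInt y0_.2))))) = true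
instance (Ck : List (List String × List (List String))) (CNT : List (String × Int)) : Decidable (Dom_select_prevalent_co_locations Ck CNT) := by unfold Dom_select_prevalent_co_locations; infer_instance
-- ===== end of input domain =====

-- B replaces A's per-position list-then-set distinct count by a sort-then-boundary-scan distinct
-- count and a filter/all comprehension decomposition (objective: alternative).

-- Exact integer model of Python's float test 'l / c < 0.1' (min_prev = 0.1, true division) for
-- l ≥ 0 (a distinct count) and 0 < |c| ≤ 2^31 (Dom bound): the IEEE double nearest to 0.1 exceeds
-- 1/10 by ≈5.6e-18, and no fraction l/c with 0 < c ≤ 2^31 lies within 1/(10c) ≥ 4.7e-11 of 1/10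
-- from below, so correctly rounded l/c compares to that double exactly as l/c compares to 1/10;
-- for c < 0 the quotient is ≤ -0.0 < 0.1. Both ports use it for the same source comparison
-- (B's 'ratio >= min_prev' is the exact negation of A's 'ratio < min_prev': no NaN arises).
def pyLtMinPrev (l c : Int) : Bool := decide (c < 0) || decide (10 * l < c)

-- ===== PORT A =====
def select_prevalent_co_locations (Ck : List (List String × List (List String))) (CNT : List (String × Int)) : List (List String) :=
  Ck.foldl (fun P p =>
    let mode := p.1
    let instances := p.2
    let flag := (PySem.List.pyRange 0 (mode.length : Int) 1).foldl (fun flag i =>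
      let PR_S : List String := instances.foldl (fun acc inst => acc ++ [PySem.List.pyGetD inst i ""]) []
      let PR_Sset : PySem.Set String := PySem.Set.ofList PR_S
      -- PR_num = len(PR_S) / CNT[mode[i]]; 'PR_num < min_prev' ported exactly by pyLtMinPrev
      if pyLtMinPrev (PR_Sset.length : Int) (PySem.Dict.getD ⟨CNT⟩ (PySem.List.pyGetD mode i "") 0)
      then false else flag) true
    if flag then P ++ [mode] else P) []

-- ===== PORT B =====
-- loop body of _distinct_sorted: state (n, prev); 'if prev is None or v != prev: n += 1; prev = v'
def pvStep (st : Int × Option String) (v : String) : Int × Option String :=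
  (if st.2 = none ∨ some v ≠ st.2 then st.1 + 1 else st.1, some v)

-- _distinct_sorted: sort, then count boundaries between adjacent unequal values
def pvDistinctSorted (values : List String) : Int :=
  ((PySem.List.sorted values (fun v => v) false).foldl pvStep ((0 : Int), (none : Option String))).1

def select_prevalent_co_locations_alt (Ck : List (List String × List (List String))) (CNT : List (String × Int)) : List (List String) :=
  (Ck.filter (fun p =>
    (PySem.List.pyRange 0 (p.1.length : Int) 1).all (fun i =>
      -- 'ratio >= min_prev' = not (ratio < min_prev), ported exactly as the negation of pyLtMinPrev
      !(pyLtMinPrev (pvDistinctSorted (p.2.map (fun inst => PySem.List.pyGetD inst i "")))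
          (PySem.Dict.getD ⟨CNT⟩ (PySem.List.pyGetD p.1 i "") 0))))).map (fun p => p.1)

-- ===== PRECONDITION & SPEC =====
-- Pre_ = exactly the inputs where Python A returns: every feature of every candidate mode is a key
-- of CNT with a nonzero count (else KeyError / ZeroDivisionError), and every instance of a
-- candidate is at least as long as its mode (else IndexError on instance[i]).
def Pre_select_prevalent_co_locations (Ck : List (List String × List (List String))) (CNT : List (String × Int)) : Prop :=
  ∀ p ∈ Ck, (∀ f ∈ p.1, PySem.Dict.getD (⟨CNT⟩ : PySem.Dict String Int) f 0 ≠ 0) ∧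
            (∀ inst ∈ p.2, p.1.length ≤ inst.length)
instance (Ck : List (List String × List (List String))) (CNT : List (String × Int)) : Decidable (Pre_select_prevalent_co_locations Ck CNT) := by unfold Pre_select_prevalent_co_locations; infer_instance

def pvWitness_select_prevalent_co_locations : (List (List String × List (List String))) × (List (String × Int)) :=
  ([(["A", "B"], [["a1", "b1"], ["a1", "b2"]]), (["C"], [])], [("A", 2), ("B", 2), ("C", 5)])

def Spec_select_prevalent_co_locations (Ck : List (List String × List (List String))) (CNT : List (String × Int)) (out : List (List String)) : Prop := out = select_prevalent_co_locations_alt Ck CNT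
instance (Ck : List (List String × List (List String))) (CNT : List (String × Int)) (out : List (List String)) : Decidable (Spec_select_prevalent_co_locations Ck CNT out) := by unfold Spec_select_prevalent_co_locations; infer_instance

-- ===== CLAIM (what is proved, stated in full; the proofs are below) =====
def Claim_equal_select_prevalent_co_locations : Prop := ∀ (Ck : List (List String × List (List String))) (CNT : List (String × Int)), Dom_select_prevalent_co_locations Ck CNT → Pre_select_prevalent_co_locations Ck CNT → Spec_select_prevalent_co_locations Ck CNT (select_prevalent_co_locations Ck CNT)

-- ===== LEMMAS AND PROOFS =====

-- A's no-break flag loop is an 'all' of the negated condition.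
theorem pv_flag_all {α : Type} (l : List α) (c : α → Bool) (b : Bool) :
    l.foldl (fun f i => if c i then false else f) b = (b && l.all (fun i => !c i)) := by
  induction l generalizing b with
  | nil => simp
  | cons x xs ih =>
    simp only [List.foldl_cons, List.all_cons, ih]
    cases hx : c x <;> simp

-- A's accumulate-if loop is B's filter-then-map comprehension.
theorem pv_select_filter_map {α β : Type} (l : List (α × β)) (c : α × β → Bool) (acc : List α) :
    l.foldl (fun P p => if c p then P ++ [p.1] else P) acc = acc ++ (l.filter c).map (fun p => p.1) := by
  induction l generalizing acc with
  | nil => simp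
  | cons p l ih =>
    simp only [List.foldl_cons, List.filter_cons]
    cases hp : c p <;> simp [ih]

-- Boundary scan over a (≤)-sorted list from state (n, u), where u (if present) is a lower bound:
-- it adds the number of distinct elements other than u.
theorem pv_boundary (col : List String) (h : col.Pairwise (· ≤ ·)) :
    ∀ (n : Int) (u : Option String), (∀ x ∈ col, ∀ y, u = some y → y ≤ x) →
    (col.foldl pvStep (n, u)).1
      = n + (((PySem.Set.ofList col).filter (fun x => decide (some x ≠ u))).length : Int) := by
  induction h with
  | nil => intro n u _; simp [PySem.Set.ofList]
  | @cons v rest hv hrest ih =>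
    intro n u hu
    simp only [List.foldl_cons]
    by_cases hc : u = none ∨ some v ≠ u
    · have hstep : pvStep (n, u) v = (n + 1, some v) := by simp [pvStep, hc]
      have hpv : decide (some v ≠ u) = true := by
        rcases hc with hc | hc <;> simp [hc]
      rw [hstep, ih (n + 1) (some v) (by intro x hx y hy; cases hy; exact hv x hx),
          PySem.Set.ofList_cons, PySem.Set.discard]
      have h1 : ((v :: List.filter (fun y => !y == v) (PySem.Set.ofList rest)).filter
            (fun x => decide (some x ≠ u)))
          = v :: (PySem.Set.ofList rest).filter (fun x => decide (some x ≠ some v)) := by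
        rw [List.filter_cons]
        simp only [hpv, if_true, List.filter_filter]
        refine congrArg _ (List.filter_congr (fun x hx => ?_))
        have hxr : x ∈ rest := (PySem.Set.mem_ofList rest x).mp hx
        by_cases hxv : x = v
        · simp [hxv]
        · have hxu : some x ≠ u := by
            intro hxu
            rcases hc with hc | hc
            · rw [hc] at hxu; cases hxu
            · have hle := hu v List.mem_cons_self x hxu.symm
              have hvx := hv x hxr
              exact hxv (le_antisymm hvx hle).symm
          simp [hxv, hxu]
      rw [h1]
      simp only [List.length_cons]
      push_cast
      ring
    · have hueq : u = some v := by
        rcases u with _ | y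
        · exact absurd (Or.inl rfl) hc
        · have hvy : some v = some y := by
            by_contra hne
            exact hc (Or.inr hne)
          exact hvy.symm
      have hstep : pvStep (n, u) v = (n, some v) := by simp [pvStep, hueq]
      rw [hstep, ih n (some v) (by intro x hx y hy; cases hy; exact hv x hx), hueq]
      congr 2
      rw [PySem.Set.ofList_cons, PySem.Set.discard, List.filter_cons, if_neg (by simp),
          List.filter_filter]
      refine congrArg List.length ((List.filter_congr (fun x _ => ?_)).symm)
      by_cases hxv : x = v <;> simp [hxv]

-- B's sort-then-scan distinct count equals A's set-of-the-column size.
theorem pv_distinct (values : List String) :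
    pvDistinctSorted values = ((PySem.Set.ofList values).length : Int) := by
  unfold pvDistinctSorted
  rw [pv_boundary (PySem.List.sorted values (fun v => v) false)
        (PySem.List.sorted_pairwise values (fun v => v))
        0 none (by intro x _ y hy; cases hy)]
  have hperm : (PySem.Set.ofList (PySem.List.sorted values (fun v => v) false)).Perm
      (PySem.Set.ofList values) := by
    refine (List.perm_ext_iff_of_nodup (PySem.Set.nodup_ofList _) (PySem.Set.nodup_ofList _)).mpr
      (fun a => ?_)
    rw [PySem.Set.mem_ofList, PySem.Set.mem_ofList,
        PySem.List.mem_sorted]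
  simp [hperm.length_eq]

-- The two ports agree on every input (their total primitives coincide even off Pre_).
theorem pv_ports_eq (Ck : List (List String × List (List String))) (CNT : List (String × Int)) :
    select_prevalent_co_locations Ck CNT = select_prevalent_co_locations_alt Ck CNT := by
  unfold select_prevalent_co_locations select_prevalent_co_locations_alt
  rw [pv_select_filter_map, List.nil_append]
  refine congrArg (List.map (fun p : List String × List (List String) => p.1)) (List.filter_congr (fun p _ => ?_))
  rw [pv_flag_all, Bool.true_and]
  refine congrArg _ (funext fun i => ?_)
  simp only [PySem.List.foldl_append_singleton_eq_map, List.nil_append, pv_distinct]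

-- ===== VERDICT (by name: the statement is the Claim_ definition above) =====
theorem select_prevalent_co_locations_spec : Claim_equal_select_prevalent_co_locations := by
  intro Ck CNT _ _
  unfold Spec_select_prevalent_co_locations
  exact pv_ports_eq Ck CNT
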